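-- pv_equiv track=rewrite | github.com/whdals6831/Algorithm_Problem | src/main/python/Programmers/1_모의고사.py | solution
-- ===== SOURCE A (Python) =====
-- def check(answers, result):
--     ans_len = len(answers)
--     res_len = len(result)
--     ans_cnt = 0
--
--     multiply_result_cnt = ans_len // res_len
--     slice_result_index = ans_len % res_len
--
--     answer_list = result * multiply_result_cnt + result[:slice_result_index]
--
--     for idx, answer in enumerate(answers):
--         if answer == answer_list[idx]:
--             ans_cnt += 1
--
--     return ans_cnt
--
-- def solution(answers):
--     answer = []
--
--     max_ans_cnt = 0
--     answer_cnt_list = []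
--
--     first_student = [1,2,3,4,5]
--     second_student = [2,1,2,3,2,4,2,5]
--     third_student = [3,3,1,1,2,2,4,4,5,5]
--
--     answer_cnt_list.append(check(answers, first_student))
--     answer_cnt_list.append(check(answers, second_student))
--     answer_cnt_list.append(check(answers, third_student))
--
--     max_ans_cnt = max(answer_cnt_list)
--
--     i = 1
--     for student in answer_cnt_list:
--         if max_ans_cnt == student:
--             answer.append(i)
--         i += 1
--
--     return answer
-- ===== SOURCE B (Python) =====
-- def solution(answers):
--     patterns = [[1, 2, 3, 4, 5],
--                 [2, 1, 2, 3, 2, 4, 2, 5],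
--                 [3, 3, 1, 1, 2, 2, 4, 4, 5, 5]]
--     # Aggregate the answers once into a histogram keyed by (position mod 40, value);
--     # 40 = lcm of the pattern lengths, so i mod 40 determines every pattern's guess at i.
--     cnt = {}
--     for i, a in enumerate(answers):
--         key = (i % 40, a)
--         cnt[key] = cnt.get(key, 0) + 1
--     # Each score is then 40 histogram lookups, independent of len(answers).
--     scores = [sum(cnt.get((r, p[r % len(p)]), 0) for r in range(40)) for p in patterns]
--     best = max(scores)
--     return [i for i, s in enumerate(scores, 1) if s == best]
-- ===== Notes on version B (the rewrite author's own statement) =====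
-- stated objective: alternative
-- what changed: B replaces A's per-pattern replicated answer sheet and per-element comparison loop with a two-stage aggregate-then-query algorithm: one pass builds a histogram keyed by (position mod 40, answer value) (40 = lcm of the pattern lengths), and each pattern's score is then just 40 histogram lookups; winners are collected with max/enumerate instead of A's manual counter loop.
import Mathlib
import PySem

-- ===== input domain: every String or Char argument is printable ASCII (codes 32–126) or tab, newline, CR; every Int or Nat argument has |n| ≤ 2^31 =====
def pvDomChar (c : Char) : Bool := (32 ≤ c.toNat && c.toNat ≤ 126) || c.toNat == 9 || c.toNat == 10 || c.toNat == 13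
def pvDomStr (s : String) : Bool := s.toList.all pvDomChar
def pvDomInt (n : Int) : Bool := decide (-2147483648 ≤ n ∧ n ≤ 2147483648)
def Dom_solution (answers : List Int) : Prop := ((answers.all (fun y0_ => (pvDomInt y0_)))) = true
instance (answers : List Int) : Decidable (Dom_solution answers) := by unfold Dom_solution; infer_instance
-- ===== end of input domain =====

-- B aggregates the answers once into a histogram keyed by (position mod 40, value)
-- (40 = lcm of the pattern lengths) and reads each pattern's score off as 40 lookups,
-- instead of A's per-pattern replicated answer sheet and per-element comparison loop;
-- same return value on every input.

-- ===== PORT A =====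
def check (answers result : List Int) : Int :=
  let ansLen : Int := answers.length
  let resLen : Int := result.length
  let multiplyResultCnt := PySem.Int.floordiv ansLen resLen
  let sliceResultIndex := PySem.Int.mod ansLen resLen
  let answerList := PySem.List.pyRepeat result multiplyResultCnt ++
                    PySem.List.slice result none (some sliceResultIndex)
  -- answer_list[idx] via pyGetD: idx is always in range here (answer_list has
  -- length len(answers) whenever result is nonempty, as in every call below)
  (PySem.List.enumerate answers 0).foldl
    (fun ansCnt p => if p.2 = PySem.List.pyGetD answerList p.1 0 then ansCnt + 1 else ansCnt) 0

def solution (answers : List Int) : List Int :=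
  let firstStudent : List Int := [1, 2, 3, 4, 5]
  let secondStudent : List Int := [2, 1, 2, 3, 2, 4, 2, 5]
  let thirdStudent : List Int := [3, 3, 1, 1, 2, 2, 4, 4, 5, 5]
  let answerCntList : List Int :=
    [check answers firstStudent, check answers secondStudent, check answers thirdStudent]
  -- max of a (nonempty, 3-element) list; the getD default is unreachable
  let maxAnsCnt := (PySem.List.max? answerCntList (fun x => x)).getD 0
  (answerCntList.foldl
    (fun (st : List Int × Int) student =>
      (if maxAnsCnt = student then st.1 ++ [st.2] else st.1, st.2 + 1)) ([], 1)).1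

-- ===== PORT B =====
def solution_alt (answers : List Int) : List Int :=
  let patterns : List (List Int) :=
    [[1, 2, 3, 4, 5], [2, 1, 2, 3, 2, 4, 2, 5], [3, 3, 1, 1, 2, 2, 4, 4, 5, 5]]
  -- cnt[key] = cnt.get(key, 0) + 1 over enumerate(answers)
  let cnt : PySem.Dict (Int × Int) Int :=
    (PySem.List.enumerate answers 0).foldl
      (fun d q =>
        let key := (PySem.Int.mod q.1 40, q.2)
        d.insert key (d.getD key 0 + 1))
      PySem.Dict.empty
  -- p[r % len(p)] via pyGetD: r ∈ [0,40) and len(p) divides 40, so always in range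
  let scores : List Int := patterns.map (fun p =>
    ((PySem.List.pyRange 0 40 1).map
      (fun r => cnt.getD (r, PySem.List.pyGetD p (PySem.Int.mod r (p.length : Int)) 0) 0)).sum)
  let best := (PySem.List.max? scores (fun x => x)).getD 0
  (PySem.List.enumerate scores 1).filterMap (fun q => if q.2 = best then some q.1 else none)

-- ===== PRECONDITION & SPEC =====
def Spec_solution (answers : List Int) (out : List Int) : Prop := out = solution_alt answers
instance (answers : List Int) (out : List Int) : Decidable (Spec_solution answers out) := by unfold Spec_solution; infer_instance

-- ===== CLAIM (what is proved, stated in full; the proofs are below) =====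
def Claim_equal_solution : Prop := ∀ (answers : List Int), Dom_solution answers → Spec_solution answers (solution answers)

-- ===== LEMMAS AND PROOFS =====

-- reference count: number of positions i (counted from j) with ans[i] = pat[i % len pat]
def mcount (pat : List Int) (j : Nat) : List Int → Int
  | [] => 0
  | a :: as => (if a = pat.getD (j % pat.length) 0 then 1 else 0) + mcount pat (j + 1) as

-- k concatenated copies of pat
def ext (pat : List Int) (k : Nat) : List Int := (List.replicate k pat).flatten

theorem ext_cons (pat : List Int) (k : Nat) : ext pat (k + 1) = pat ++ ext pat k := by
  simp [ext, List.replicate_succ]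

theorem length_ext (pat : List Int) (k : Nat) : (ext pat k).length = k * pat.length := by
  simp [ext, List.sum_replicate, smul_eq_mul]

theorem getD_ext (pat : List Int) (k i : Nat) (h : i < k * pat.length) :
    (ext pat k).getD i 0 = pat.getD (i % pat.length) 0 := by
  induction k generalizing i with
  | zero => omega
  | succ k ih =>
    rw [ext_cons]
    by_cases hi : i < pat.length
    · rw [List.getD_append _ _ _ _ hi, Nat.mod_eq_of_lt hi]
    · rw [Nat.not_lt] at hi
      rw [List.getD_append_right _ _ _ _ hi, ih (i - pat.length) (by
        have hs : (k + 1) * pat.length = k * pat.length + pat.length := by ring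
        omega)]
      obtain ⟨t, rfl⟩ : ∃ t, i = pat.length + t := ⟨i - pat.length, by omega⟩
      simp [Nat.add_mod_left]

-- A's counting loop over the materialised answer sheet is mcount
theorem foldA (pat AL : List Int)
    (hAL : ∀ i, i < AL.length → AL.getD i 0 = pat.getD (i % pat.length) 0) :
    ∀ (ans : List Int) (j : Nat) (c : Int), j + ans.length ≤ AL.length →
    (PySem.List.enumerate ans (j : Int)).foldl
      (fun cnt p => if p.2 = PySem.List.pyGetD AL p.1 0 then cnt + 1 else cnt) c
    = c + mcount pat j ans := by
  intro ans
  induction ans with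
  | nil => intro j c _; simp [PySem.List.enumerate_nil, mcount]
  | cons a as ih =>
    intro j c h
    rw [PySem.List.enumerate_cons, List.foldl_cons]
    have hget : PySem.List.pyGetD AL (j : Int) 0 = pat.getD (j % pat.length) 0 := by
      rw [PySem.List.pyGetD_natCast]
      exact hAL j (by simp at h; omega)
    have hcast : (j : Int) + 1 = ((j + 1 : Nat) : Int) := by push_cast; ring
    rw [hget, hcast, ih (j + 1) _ (by simp at h ⊢; omega)]
    simp only [mcount]
    split_ifs <;> omega

theorem checkA (ans pat : List Int) (hp : pat ≠ []) :
    check ans pat = mcount pat 0 ans := by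
  have hlen : 0 < pat.length := List.length_pos_iff.mpr hp
  set n := ans.length with hn
  set L := pat.length with hL
  have hq : PySem.Int.floordiv (n : Int) (L : Int) = ((n / L : Nat) : Int) := by
    simp only [PySem.Int.floordiv]
    rw [Int.fdiv_eq_ediv] <;> simp
  have hr : PySem.Int.mod (n : Int) (L : Int) = ((n % L : Nat) : Int) := by
    simp only [PySem.Int.mod]
    rw [Int.fmod_eq_emod] <;> simp
  have hrep : PySem.List.pyRepeat pat ((n / L : Nat) : Int) = ext pat (n / L) := by
    simp only [PySem.List.pyRepeat, ext, Int.toNat_natCast]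
  have hslice : PySem.List.slice pat none (some ((n % L : Nat) : Int)) = pat.take (n % L) :=
    PySem.List.slice_to_natCast pat (n % L)
  have hmod : n % L < L := Nat.mod_lt _ hlen
  have hdm := Nat.div_add_mod n L
  set AL := ext pat (n / L) ++ pat.take (n % L) with hAL
  have hcomm : (n / L) * L = L * (n / L) := Nat.mul_comm _ _
  have hALlen : AL.length = n := by
    simp only [hAL, List.length_append, length_ext, List.length_take, ← hL,
      min_eq_left hmod.le]
    omega
  have hprop : ∀ i, i < AL.length → AL.getD i 0 = pat.getD (i % L) 0 := by
    intro i hi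
    rw [hALlen] at hi
    by_cases hcase : i < (n / L) * L
    · rw [hAL, List.getD_append _ _ _ _ (by rw [length_ext]; exact hcase)]
      exact getD_ext pat (n / L) i hcase
    · rw [Nat.not_lt] at hcase
      have hlt : i - (n / L) * L < n % L := by omega
      rw [hAL, List.getD_append_right _ _ _ _ (by rw [length_ext, ← hL]; exact hcase),
        length_ext, ← hL]
      have htake : (pat.take (n % L)).getD (i - n / L * L) 0 = pat.getD (i - n / L * L) 0 := by
        have h1 : i - n / L * L < (pat.take (n % L)).length := by
          simp [List.length_take]; omega
        rw [List.getD_eq_getElem _ _ h1, List.getElem_take,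
          List.getD_eq_getElem _ _ (by omega)]
      rw [htake]
      congr 1
      obtain ⟨t, ht⟩ : ∃ t, i = t + (n / L) * L := ⟨i - (n / L) * L, by omega⟩
      subst ht
      rw [Nat.add_mul_mod_self_right, Nat.mod_eq_of_lt (by omega)]
      omega
  unfold check
  simp only [← hn, ← hL, hq, hr, hrep, hslice, ← hAL]
  have hfold := foldA pat AL hprop ans 0 0 (by omega)
  simpa using hfold

-- sum of an indicator over a duplicate-free list picks the unique hit
theorem sum_ite_not_mem (f : Int → Int) (c : Int) :
    ∀ (R : List Int), c ∉ R → (R.map (fun r => if r = c then f r else 0)).sum = 0 := by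
  intro R
  induction R with
  | nil => simp
  | cons x xs ih =>
    intro h
    simp only [List.mem_cons, not_or] at h
    simp [Ne.symm h.1, ih h.2]

theorem sum_ite_single (f : Int → Int) (c : Int) :
    ∀ (R : List Int), R.Nodup → c ∈ R →
    (R.map (fun r => if r = c then f r else 0)).sum = f c := by
  intro R
  induction R with
  | nil => simp
  | cons x xs ih =>
    intro hnd hc
    rcases List.mem_cons.mp hc with rfl | hc
    · simp [sum_ite_not_mem f c xs (by simpa using (List.nodup_cons.mp hnd).1)]
    · have hne : x ≠ c := by
        rintro rfl; exact (List.nodup_cons.mp hnd).1 hc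
      simp [hne, ih (List.nodup_cons.mp hnd).2 hc]

-- B's 40 histogram lookups for one pattern are mcount
theorem sumB (pat : List Int) (hp : pat ≠ []) (hdvd : pat.length ∣ 40) :
    ∀ (ans : List Int) (j : Nat),
    ((PySem.List.pyRange 0 40 1).map (fun r =>
      ((((PySem.List.enumerate ans (j : Int)).map
          (fun q => (PySem.Int.mod q.1 40, q.2))).count
        (r, PySem.List.pyGetD pat (PySem.Int.mod r (pat.length : Int)) 0) : Nat) : Int))).sum
    = mcount pat j ans := by
  have hlen : 0 < pat.length := List.length_pos_iff.mpr hp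
  intro ans
  induction ans with
  | nil =>
    intro j
    simp [PySem.List.enumerate_nil, mcount, List.map_const']
  | cons a as ih =>
    intro j
    rw [PySem.List.enumerate_cons, List.map_cons]
    have hc40 : PySem.Int.mod ((j : Nat) : Int) 40 = ((j % 40 : Nat) : Int) := by
      exact_mod_cast PySem.Int.mod_natCast j 40
    rw [hc40]
    have hcast : (j : Int) + 1 = ((j + 1 : Nat) : Int) := by push_cast; ring
    rw [hcast]
    set tl : List (Int × Int) :=
      (PySem.List.enumerate as ((j + 1 : Nat) : Int)).map
        (fun q => (PySem.Int.mod q.1 40, q.2)) with htl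
    have hmapeq :
        (PySem.List.pyRange 0 40 1).map (fun r =>
          (((((j % 40 : Nat) : Int), a) :: tl).count
            (r, PySem.List.pyGetD pat (PySem.Int.mod r (pat.length : Int)) 0) : Int))
        = (PySem.List.pyRange 0 40 1).map (fun r =>
            ((tl.count (r, PySem.List.pyGetD pat (PySem.Int.mod r (pat.length : Int)) 0) : Int)
             + (if r = ((j % 40 : Nat) : Int)
                then (if a = PySem.List.pyGetD pat (PySem.Int.mod r (pat.length : Int)) 0
                      then 1 else 0)
                else 0))) := by
      refine List.map_congr_left (fun r _ => ?_)
      rw [List.count_cons]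
      push_cast
      congr 1
      simp only [beq_iff_eq, Prod.mk.injEq]
      by_cases h1 : r = ((j % 40 : Nat) : Int) <;>
        by_cases h2 : a = PySem.List.pyGetD pat (PySem.Int.mod r (pat.length : Int)) 0 <;>
        subst_eqs <;> simp_all <;> omega
    rw [hmapeq, PySem.List.sum_map_add_int, ih (j + 1)]
    have hmem : ((j % 40 : Nat) : Int) ∈ PySem.List.pyRange 0 40 1 := by
      rw [PySem.List.mem_pyRange_one]
      have := Nat.mod_lt j (show 0 < 40 by norm_num)
      omega
    have hnd : (PySem.List.pyRange 0 40 1).Nodup := by decide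
    have hsingle := sum_ite_single
      (fun r => if a = PySem.List.pyGetD pat (PySem.Int.mod r (pat.length : Int)) 0
               then 1 else 0)
      ((j % 40 : Nat) : Int) (PySem.List.pyRange 0 40 1) hnd hmem
    simp only at hsingle
    rw [hsingle]
    have hpvc : PySem.List.pyGetD pat
        (PySem.Int.mod ((j % 40 : Nat) : Int) (pat.length : Int)) 0
        = pat.getD (j % pat.length) 0 := by
      have h1 : PySem.Int.mod ((j % 40 : Nat) : Int) ((pat.length : Nat) : Int)
          = (((j % 40) % pat.length : Nat) : Int) := PySem.Int.mod_natCast _ _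
      rw [h1, PySem.List.pyGetD_natCast, Nat.mod_mod_of_dvd j hdvd]
    rw [hpvc]
    simp only [mcount]
    ring

-- A's winner-collecting loop is an enumerate/filterMap
theorem sel (l : List Int) (mx : Int) :
    ∀ (s : Int) (acc : List Int),
    (l.foldl (fun (st : List Int × Int) x =>
        (if mx = x then st.1 ++ [st.2] else st.1, st.2 + 1)) (acc, s)).1
    = acc ++ (PySem.List.enumerate l s).filterMap
        (fun p => if p.2 = mx then some p.1 else none) := by
  induction l with
  | nil => intro s acc; simp [PySem.List.enumerate_nil]
  | cons x xs ih =>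
    intro s acc
    rw [List.foldl_cons, PySem.List.enumerate_cons, List.filterMap_cons]
    by_cases h : x = mx
    · subst h; simp [ih]
    · have h' : ¬ mx = x := fun hh => h hh.symm
      simp [h, h', ih]

-- the histogram fold is a Counter of the (position mod 40, value) pairs
theorem cnt_eq_counter (answers : List Int) :
    (PySem.List.enumerate answers 0).foldl
      (fun (d : PySem.Dict (Int × Int) Int) q =>
        let key := (PySem.Int.mod q.1 40, q.2)
        d.insert key (d.getD key 0 + 1))
      PySem.Dict.empty
    = PySem.Dict.counter ((PySem.List.enumerate answers 0).map
        (fun q => (PySem.Int.mod q.1 40, q.2))) := by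
  rw [← PySem.Dict.foldl_insert_getD_add_one_eq_counter, List.foldl_map]

-- ===== VERDICT (by name: the statement is the Claim_ definition above) =====
theorem solution_spec : Claim_equal_solution := by
  intro answers _
  unfold Spec_solution solution solution_alt
  simp only [List.map_cons, List.map_nil, cnt_eq_counter, PySem.Dict.getD_counter]
  rw [checkA answers [1,2,3,4,5] (by simp),
      checkA answers [2,1,2,3,2,4,2,5] (by simp),
      checkA answers [3,3,1,1,2,2,4,4,5,5] (by simp)]
  have hs1 := sumB [1,2,3,4,5] (by simp) (by norm_num) answers 0
  have hs2 := sumB [2,1,2,3,2,4,2,5] (by simp) (by norm_num) answers 0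
  have hs3 := sumB [3,3,1,1,2,2,4,4,5,5] (by simp) (by norm_num) answers 0
  simp only [Nat.cast_zero] at hs1 hs2 hs3
  rw [hs1, hs2, hs3, sel]
  rfl
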